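-- pv_equiv track=rewrite | github.com/nevaliashka-no-hacker/algorithms_and_structures | dz_sem2/102.py | len_result
-- ===== SOURCE A (Python) =====
-- def len_result(nums, limit):
--     if len(nums) < 2:
--         return None
--
--     left = 0
--     right = len(nums)
--     max_res = []
--     window = nums
--
--     #1
--     while left < right and left < len(nums) and right > 0 and len(window) > 1:
--         window = nums[left:right]
--         max_num = max(window)
--         min_num = min(window)
--         if max_num - min_num <= limit:
--             if len(window) > len(max_res):
--                 max_res = window
--         if nums[left] > nums[right - 1]:
--             left += 1
--         else:
--             right -= 1
--
--     return max_res
-- ===== SOURCE B (Python) =====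
-- def len_result(nums, limit):
--     # O(n): record the greedy shrink chain of windows, then sweep it backwards
--     # (growing the window by one element per step) keeping a running max/min,
--     # and answer with the longest window whose spread is within the limit.
--     n = len(nums)
--     if n < 2:
--         return None
--     chain = []
--     l, r = 0, n
--     while r - l > 1:
--         chain.append((l, r))
--         if nums[l] > nums[r - 1]:
--             l += 1
--         else:
--             r -= 1
--     chain.append((l, r))
--     best = None
--     mx = mn = nums[l]
--     for pl, pr in reversed(chain):
--         if pl < l:
--             l = pl
--             v = nums[pl]
--         elif pr > r:
--             r = pr
--             v = nums[pr - 1]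
--         else:
--             v = nums[pl]
--         if v > mx:
--             mx = v
--         if v < mn:
--             mn = v
--         if mx - mn <= limit:
--             best = (pl, pr)
--     if best is None:
--         return []
--     return nums[best[0]:best[1]]
-- ===== Notes on version B (the rewrite author's own statement) =====
-- stated objective: faster
-- what changed: B records the greedy shrink chain of window endpoints first, then sweeps the chain backwards growing the window one element per step with a running max/min, instead of recomputing max/min of the whole window at every step.
import Mathlib
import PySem

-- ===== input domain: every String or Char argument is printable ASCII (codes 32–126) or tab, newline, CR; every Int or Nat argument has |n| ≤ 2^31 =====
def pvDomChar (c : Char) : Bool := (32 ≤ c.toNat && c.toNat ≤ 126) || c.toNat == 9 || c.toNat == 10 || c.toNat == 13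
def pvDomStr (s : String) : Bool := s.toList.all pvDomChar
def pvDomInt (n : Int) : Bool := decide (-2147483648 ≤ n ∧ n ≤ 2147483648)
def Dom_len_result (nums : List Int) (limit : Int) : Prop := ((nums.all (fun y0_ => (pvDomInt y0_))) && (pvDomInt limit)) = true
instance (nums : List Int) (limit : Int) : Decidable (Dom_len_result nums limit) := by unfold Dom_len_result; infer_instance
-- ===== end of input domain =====

-- B replaces A's per-step max/min recomputation over the whole window by one backward
-- sweep of the recorded shrink chain with a running max/min (asymptotically faster;
-- measured faster in a timing run). Return values agree on all inputs.

-- ===== PORT A =====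
-- termination measures for the transliterated while loops (cited by name in decreasing_by)
theorem pv_decA_left {left right : Int} (h : left < right) :
    (right - (left + 1)).toNat < (right - left).toNat := by omega
theorem pv_decA_right {left right : Int} (h : left < right) :
    (right - 1 - left).toNat < (right - left).toNat := by omega

-- the while loop of A: state (left, right, max_res, window)
def lenLoopA (nums : List Int) (limit : Int) (left right : Int)
    (maxRes window : List Int) : List Int :=
  if h : left < right ∧ left < (nums.length : Int) ∧ 0 < right ∧ 1 < window.length then
    let w := PySem.List.slice nums (some left) (some right)
    -- max(window)/min(window): window is nonempty on every reachable state, `.getD 0` only totalizes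
    let maxNum := (PySem.List.max? w (fun x => x)).getD 0
    let minNum := (PySem.List.min? w (fun x => x)).getD 0
    let maxRes' := if maxNum - minNum ≤ limit then
                     (if maxRes.length < w.length then w else maxRes)
                   else maxRes
    if (PySem.List.pyGet? nums left).getD 0 > (PySem.List.pyGet? nums (right - 1)).getD 0 then
      lenLoopA nums limit (left + 1) right maxRes' w
    else
      lenLoopA nums limit left (right - 1) maxRes' w
  else maxRes
termination_by (right - left).toNat
decreasing_by
· exact pv_decA_left h.1
· exact pv_decA_right h.1

def len_result (nums : List Int) (limit : Int) : Option (List Int) :=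
  if nums.length < 2 then none
  else some (lenLoopA nums limit 0 (nums.length : Int) [] nums)

-- ===== PORT B =====
theorem pv_decB_left {l r : Int} (h : 1 < r - l) :
    (r - (l + 1)).toNat < (r - l).toNat := by omega
theorem pv_decB_right {l r : Int} (h : 1 < r - l) :
    (r - 1 - l).toNat < (r - l).toNat := by omega

-- B's first loop: record the shrink chain of endpoint pairs; returns (chain ++ final pair, final l, final r)
def lenChainB (nums : List Int) (l r : Int) (chain : List (Int × Int)) :
    List (Int × Int) × Int × Int :=
  if h : 1 < r - l then
    let chain' := chain ++ [(l, r)]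
    if (PySem.List.pyGet? nums l).getD 0 > (PySem.List.pyGet? nums (r - 1)).getD 0 then
      lenChainB nums (l + 1) r chain'
    else
      lenChainB nums l (r - 1) chain'
  else (chain ++ [(l, r)], l, r)
termination_by (r - l).toNat
decreasing_by
· exact pv_decB_left h
· exact pv_decB_right h

-- B's second loop body: state (best, mx, mn, l, r), element (pl, pr)
def lenStepB (nums : List Int) (limit : Int)
    (s : Option (Int × Int) × Int × Int × Int × Int) (p : Int × Int) :
    Option (Int × Int) × Int × Int × Int × Int :=
  let lrv : Int × Int × Int :=
    if p.1 < s.2.2.2.1 then (p.1, s.2.2.2.2, (PySem.List.pyGet? nums p.1).getD 0)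
    else if s.2.2.2.2 < p.2 then (s.2.2.2.1, p.2, (PySem.List.pyGet? nums (p.2 - 1)).getD 0)
    else (s.2.2.2.1, s.2.2.2.2, (PySem.List.pyGet? nums p.1).getD 0)
  let mx := if lrv.2.2 > s.2.1 then lrv.2.2 else s.2.1
  let mn := if lrv.2.2 < s.2.2.1 then lrv.2.2 else s.2.2.1
  let best := if mx - mn ≤ limit then some (p.1, p.2) else s.1
  (best, mx, mn, lrv.1, lrv.2.1)

def len_result_alt (nums : List Int) (limit : Int) : Option (List Int) :=
  if nums.length < 2 then none
  else
    let c := lenChainB nums 0 (nums.length : Int) []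
    let v0 := (PySem.List.pyGet? nums c.2.1).getD 0
    let res := c.1.reverse.foldl (lenStepB nums limit) (none, v0, v0, c.2.1, c.2.2)
    match res.1 with
    | none => some []
    | some (bl, br) => some (PySem.List.slice nums (some bl) (some br))

-- ===== PRECONDITION & SPEC =====
def Spec_len_result (nums : List Int) (limit : Int) (out : Option (List Int)) : Prop := out = len_result_alt nums limit
instance (nums : List Int) (limit : Int) (out : Option (List Int)) : Decidable (Spec_len_result nums limit out) := by unfold Spec_len_result; infer_instance

-- ===== CLAIM (what is proved, stated in full; the proofs are below) =====
def Claim_equal_len_result : Prop := ∀ (nums : List Int) (limit : Int), Dom_len_result nums limit → Spec_len_result nums limit (len_result nums limit)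

-- ===== LEMMAS AND PROOFS =====

-- ghost objects for the proof: the window, its extrema, the chain of endpoint pairs
def win (nums : List Int) (l r : Nat) : List Int := (nums.drop l).take (r - l)

def mxW (w : List Int) : Int := (PySem.List.max? w (fun x => x)).getD 0
def mnW (w : List Int) : Int := (PySem.List.min? w (fun x => x)).getD 0

def stepA (nums : List Int) (limit : Int) (acc : List Int) (p : Nat × Nat) : List Int :=
  let w := win nums p.1 p.2
  if mxW w - mnW w ≤ limit then (if acc.length < w.length then w else acc) else acc

def chainN (nums : List Int) (l r : Nat) : List (Nat × Nat) :=
  if h : l + 1 < r then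
    (l, r) :: (if nums.getD l 0 > nums.getD (r - 1) 0
               then chainN nums (l + 1) r else chainN nums l (r - 1))
  else [(l, r)]
termination_by r - l
decreasing_by all_goals omega

def lastW (nums : List Int) (l r : Nat) : Nat × Nat :=
  if h : l + 1 < r then
    (if nums.getD l 0 > nums.getD (r - 1) 0
     then lastW nums (l + 1) r else lastW nums l (r - 1))
  else (l, r)
termination_by r - l
decreasing_by all_goals omega

def firstSat (nums : List Int) (limit : Int) : List (Nat × Nat) → Option (Nat × Nat)
  | [] => none
  | (l, r) :: cs =>
    if mxW (win nums l r) - mnW (win nums l r) ≤ limit then some (l, r)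
    else firstSat nums limit cs

-- basic window facts
theorem win_length (nums : List Int) (l r : Nat) (_h1 : l ≤ r) (h2 : r ≤ nums.length) :
    (win nums l r).length = r - l := by
  simp [win]; omega

theorem win_cons (nums : List Int) (l r : Nat) (h1 : l < r) (h2 : l < nums.length) :
    win nums l r = nums.getD l 0 :: win nums (l + 1) r := by
  unfold win
  rw [List.drop_eq_getElem_cons h2]
  have h3 : r - l = (r - (l + 1)) + 1 := by omega
  rw [h3, List.take_succ_cons, List.getD_eq_getElem _ _ h2]

theorem win_snoc (nums : List Int) (l r : Nat) (h1 : l < r) (h2 : r ≤ nums.length) :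
    win nums l r = win nums l (r - 1) ++ [nums.getD (r - 1) 0] := by
  unfold win
  have h4 : r - l = (r - 1 - l) + 1 := by omega
  rw [h4, List.take_add_one]
  have hlt : r - 1 - l < (nums.drop l).length := by simp; omega
  have h3 : r - 1 < nums.length := by omega
  rw [List.getElem?_eq_getElem hlt, List.getD_eq_getElem _ _ h3]
  simp only [List.getElem_drop, Option.toList_some]
  congr 3
  omega

theorem mxW_cons (x : Int) (t : List Int) : mxW (x :: t) = t.foldl max x := by
  simp [mxW, PySem.List.max?_id_cons]

theorem mnW_cons (x : Int) (t : List Int) : mnW (x :: t) = t.foldl min x := by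
  simp [mnW, PySem.List.min?_id_cons]

theorem foldl_max_max (t : List Int) : ∀ a b, t.foldl max (max a b) = max a (t.foldl max b) := by
  induction t with
  | nil => intro a b; rfl
  | cons x t ih => intro a b; simp only [List.foldl_cons, max_assoc]; exact ih a (max b x)

theorem foldl_min_min (t : List Int) : ∀ a b, t.foldl min (min a b) = min a (t.foldl min b) := by
  induction t with
  | nil => intro a b; rfl
  | cons x t ih => intro a b; simp only [List.foldl_cons, min_assoc]; exact ih a (min b x)

-- A's loop equals the fold of stepA over the chain
theorem ite_lt_max (b a : Int) : (if b < a then a else b) = max b a := by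
  rw [max_def]; split_ifs <;> omega

theorem ite_lt_min (a b : Int) : (if a < b then a else b) = min b a := by
  rw [min_def]; split_ifs <;> omega

theorem pyGetD_nat (nums : List Int) (n : Nat) :
    (PySem.List.pyGet? nums (n : Int)).getD 0 = nums.getD n 0 := by
  rw [PySem.List.pyGet?_natCast, List.getD_eq_getElem?_getD]

-- A's loop equals the fold of stepA over the chain
theorem loopA_eq_fold (nums : List Int) (limit : Int) : ∀ (k l r : Nat) (acc window : List Int),
    r - l = k → l < r → r ≤ nums.length → 1 < window.length →
    lenLoopA nums limit (l : Int) (r : Int) acc window =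
      (chainN nums l r).foldl (stepA nums limit) acc := by
  intro k
  induction k using Nat.strong_induction_on with
  | _ k ih =>
    intro l r acc window hk hlr hrn hw
    rw [lenLoopA, dif_pos ⟨by omega, by omega, by omega, hw⟩]
    have hsl : PySem.List.slice nums (some (l : Int)) (some (r : Int)) = win nums l r := by
      rw [PySem.List.slice_natCast]; rfl
    have hr1 : (r : Int) - 1 = ((r - 1 : Nat) : Int) := by omega
    have hwlen : (win nums l r).length = r - l := win_length nums l r (by omega) hrn
    rw [chainN]
    by_cases hone : l + 1 < r
    · rw [dif_pos hone]
      by_cases hgt : nums.getD (r - 1) 0 < nums.getD l 0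
      · rw [if_pos hgt]
        simp only [hsl, hr1, pyGetD_nat]
        rw [if_pos hgt]
        have hcast : (l : Int) + 1 = ((l + 1 : Nat) : Int) := by omega
        rw [hcast, ih (r - (l + 1)) (by omega) (l + 1) r _ _ rfl (by omega) hrn (by omega),
          List.foldl_cons]
        congr 1
      · rw [if_neg hgt]
        simp only [hsl, hr1, pyGetD_nat]
        rw [if_neg hgt]
        rw [ih (r - 1 - l) (by omega) l (r - 1) _ _ rfl (by omega) (by omega) (by omega),
          List.foldl_cons]
        congr 1
    · rw [dif_neg hone]
      have hre : r - 1 = l := by omega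
      have hgt : ¬ nums.getD (r - 1) 0 < nums.getD l 0 := by rw [hre]; simp
      simp only [hsl, hr1, pyGetD_nat]
      rw [if_neg hgt, hre, lenLoopA,
        dif_neg (fun hcon => absurd hcon.1 (lt_irrefl _))]
      simp only [List.foldl_cons, List.foldl_nil, stepA, mxW, mnW]

theorem fold_stable (nums : List Int) (limit : Int) : ∀ (cs : List (Nat × Nat)) (acc : List Int),
    (∀ p ∈ cs, (win nums p.1 p.2).length ≤ acc.length) →
    cs.foldl (stepA nums limit) acc = acc := by
  intro cs
  induction cs with
  | nil => intro acc _; rfl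
  | cons p cs ih =>
    intro acc h
    have h1 := h p (by simp)
    have hstep : stepA nums limit acc p = acc := by
      simp only [stepA]
      split_ifs with hc1 hc2 <;> first | rfl | omega
    rw [List.foldl_cons, hstep]
    exact ih acc (fun q hq => h q (by simp [hq]))

-- chain membership bounds
theorem mem_chainN (nums : List Int) : ∀ (k l r : Nat), r - l = k → l < r →
    ∀ p ∈ chainN nums l r, l ≤ p.1 ∧ p.1 < p.2 ∧ p.2 ≤ r ∧ p.2 - p.1 ≤ r - l := by
  intro k
  induction k using Nat.strong_induction_on with
  | _ k ih =>
    intro l r hk hlr p hp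
    rw [chainN] at hp
    by_cases hone : l + 1 < r
    · rw [dif_pos hone] at hp
      rcases List.mem_cons.mp hp with h | h
      · subst h; omega
      · by_cases hgt : nums.getD l 0 > nums.getD (r - 1) 0
        · rw [if_pos hgt] at h
          have := ih (r - (l + 1)) (by omega) (l + 1) r rfl (by omega) p h
          omega
        · rw [if_neg hgt] at h
          have := ih (r - 1 - l) (by omega) l (r - 1) rfl (by omega) p h
          omega
    · rw [dif_neg hone] at hp
      simp only [List.mem_singleton] at hp
      subst hp; omega

-- the fold from [] returns the first satisfying window
theorem fold_eq_firstSat (nums : List Int) (limit : Int) : ∀ (k l r : Nat), r - l = k → l < r →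
    r ≤ nums.length →
    (chainN nums l r).foldl (stepA nums limit) [] =
      (match firstSat nums limit (chainN nums l r) with
       | some p => win nums p.1 p.2
       | none => []) := by
  intro k
  induction k using Nat.strong_induction_on with
  | _ k ih =>
    intro l r hk hlr hrn
    have hwl := win_length nums l r (by omega) hrn
    by_cases hsat : mxW (win nums l r) - mnW (win nums l r) ≤ limit
    · -- first window already satisfies: the fold keeps it forever
      rw [chainN]
      by_cases hone : l + 1 < r
      · rw [dif_pos hone]
        rw [List.foldl_cons]
        have hstep : stepA nums limit [] (l, r) = win nums l r := by
          simp only [stepA]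
          rw [if_pos hsat, if_pos (by simp [hwl]; omega)]
        rw [hstep]
        have hrest : ∀ q ∈ (if nums.getD l 0 > nums.getD (r - 1) 0
            then chainN nums (l + 1) r else chainN nums l (r - 1)),
            (win nums q.1 q.2).length ≤ (win nums l r).length := by
          intro q hq
          split_ifs at hq with hgt
          · have hb := mem_chainN nums (r - (l + 1)) (l + 1) r rfl (by omega) q hq
            rw [win_length nums q.1 q.2 (by omega) (by omega), hwl]; omega
          · have hb := mem_chainN nums (r - 1 - l) l (r - 1) rfl (by omega) q hq
            rw [win_length nums q.1 q.2 (by omega) (by omega), hwl]; omega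
        rw [fold_stable nums limit _ _ hrest]
        simp [firstSat, hsat]
      · rw [dif_neg hone]
        simp only [List.foldl_cons, List.foldl_nil]
        simp only [stepA]
        rw [if_pos hsat, if_pos (by simp [hwl]; omega)]
        simp [firstSat, hsat]
    · -- first window fails: fold from [] continues on the tail
      rw [chainN]
      by_cases hone : l + 1 < r
      · rw [dif_pos hone]
        rw [List.foldl_cons]
        have hstep : stepA nums limit [] (l, r) = [] := by
          simp only [stepA]; rw [if_neg hsat]
        rw [hstep]
        have hfs : firstSat nums limit ((l, r) :: (if nums.getD l 0 > nums.getD (r - 1) 0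
            then chainN nums (l + 1) r else chainN nums l (r - 1))) =
            firstSat nums limit (if nums.getD l 0 > nums.getD (r - 1) 0
            then chainN nums (l + 1) r else chainN nums l (r - 1)) := by
          simp [firstSat, hsat]
        rw [hfs]
        split_ifs with hgt
        · exact ih (r - (l + 1)) (by omega) (l + 1) r rfl (by omega) hrn
        · exact ih (r - 1 - l) (by omega) l (r - 1) rfl (by omega) (by omega)
      · rw [dif_neg hone]
        simp only [List.foldl_cons, List.foldl_nil]
        simp only [stepA]
        rw [if_neg hsat]
        simp [firstSat, hsat]

-- B's chain loop produces the chain and the last pair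
theorem chainB_eq (nums : List Int) : ∀ (k l r : Nat) (acc : List (Int × Int)), r - l = k →
    l < r →
    lenChainB nums (l : Int) (r : Int) acc =
      (acc ++ (chainN nums l r).map (fun p => ((p.1 : Int), (p.2 : Int))),
       ((lastW nums l r).1 : Int), ((lastW nums l r).2 : Int)) := by
  intro k
  induction k using Nat.strong_induction_on with
  | _ k ih =>
    intro l r acc hk hlr
    have hr1 : (r : Int) - 1 = ((r - 1 : Nat) : Int) := by omega
    rw [lenChainB, chainN, lastW]
    by_cases hone : l + 1 < r
    · rw [dif_pos (by omega), dif_pos hone, dif_pos hone]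
      simp only [hr1, pyGetD_nat]
      by_cases hgt : nums.getD (r - 1) 0 < nums.getD l 0
      · rw [if_pos hgt, if_pos hgt, if_pos hgt]
        have hcast : (l : Int) + 1 = ((l + 1 : Nat) : Int) := by omega
        rw [hcast, ih (r - (l + 1)) (by omega) (l + 1) r _ rfl (by omega)]
        simp
      · rw [if_neg hgt, if_neg hgt, if_neg hgt]
        rw [ih (r - 1 - l) (by omega) l (r - 1) _ rfl (by omega)]
        simp
    · rw [dif_neg (by omega), dif_neg hone, dif_neg hone]
      simp

-- B's backward sweep computes running extrema and the first satisfying window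
theorem stepB_left (nums : List Int) (limit : Int) (best : Option (Int × Int))
    (mx mn l r pl pr : Int) (h1 : pl < l) :
    lenStepB nums limit (best, mx, mn, l, r) (pl, pr) =
      (if (if mx < (PySem.List.pyGet? nums pl).getD 0 then (PySem.List.pyGet? nums pl).getD 0 else mx) -
          (if (PySem.List.pyGet? nums pl).getD 0 < mn then (PySem.List.pyGet? nums pl).getD 0 else mn) ≤ limit
       then some (pl, pr) else best,
       (if mx < (PySem.List.pyGet? nums pl).getD 0 then (PySem.List.pyGet? nums pl).getD 0 else mx),
       (if (PySem.List.pyGet? nums pl).getD 0 < mn then (PySem.List.pyGet? nums pl).getD 0 else mn),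
       pl, r) := by
  simp only [lenStepB, gt_iff_lt, if_pos h1]

theorem stepB_right (nums : List Int) (limit : Int) (best : Option (Int × Int))
    (mx mn l r pl pr : Int) (h1 : ¬ pl < l) (h2 : r < pr) :
    lenStepB nums limit (best, mx, mn, l, r) (pl, pr) =
      (if (if mx < (PySem.List.pyGet? nums (pr - 1)).getD 0 then (PySem.List.pyGet? nums (pr - 1)).getD 0 else mx) -
          (if (PySem.List.pyGet? nums (pr - 1)).getD 0 < mn then (PySem.List.pyGet? nums (pr - 1)).getD 0 else mn) ≤ limit
       then some (pl, pr) else best,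
       (if mx < (PySem.List.pyGet? nums (pr - 1)).getD 0 then (PySem.List.pyGet? nums (pr - 1)).getD 0 else mx),
       (if (PySem.List.pyGet? nums (pr - 1)).getD 0 < mn then (PySem.List.pyGet? nums (pr - 1)).getD 0 else mn),
       l, pr) := by
  simp only [lenStepB, gt_iff_lt, if_neg h1, if_pos h2]

theorem stepB_stay (nums : List Int) (limit : Int) (best : Option (Int × Int))
    (mx mn l r pl pr : Int) (h1 : ¬ pl < l) (h2 : ¬ r < pr) :
    lenStepB nums limit (best, mx, mn, l, r) (pl, pr) =
      (if (if mx < (PySem.List.pyGet? nums pl).getD 0 then (PySem.List.pyGet? nums pl).getD 0 else mx) -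
          (if (PySem.List.pyGet? nums pl).getD 0 < mn then (PySem.List.pyGet? nums pl).getD 0 else mn) ≤ limit
       then some (pl, pr) else best,
       (if mx < (PySem.List.pyGet? nums pl).getD 0 then (PySem.List.pyGet? nums pl).getD 0 else mx),
       (if (PySem.List.pyGet? nums pl).getD 0 < mn then (PySem.List.pyGet? nums pl).getD 0 else mn),
       l, r) := by
  simp only [lenStepB, gt_iff_lt, if_neg h1, if_neg h2]

theorem sweepB_eq (nums : List Int) (limit : Int) : ∀ (k l r : Nat), r - l = k → l < r →
    r ≤ nums.length →
    ((chainN nums l r).map (fun p => ((p.1 : Int), (p.2 : Int)))).reverse.foldl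
        (lenStepB nums limit)
        (none, nums.getD (lastW nums l r).1 0, nums.getD (lastW nums l r).1 0,
         ((lastW nums l r).1 : Int), ((lastW nums l r).2 : Int)) =
      ((firstSat nums limit (chainN nums l r)).map (fun p => ((p.1 : Int), (p.2 : Int))),
       mxW (win nums l r), mnW (win nums l r), (l : Int), (r : Int)) := by
  intro k
  induction k using Nat.strong_induction_on with
  | _ k ih =>
    intro l r hk hlr hrn
    rw [chainN, lastW]
    by_cases hone : l + 1 < r
    · rw [dif_pos hone, dif_pos hone]
      by_cases hgt : nums.getD l 0 > nums.getD (r - 1) 0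
      · -- left endpoint dropped: the sweep grows the window on the left
        rw [if_pos hgt, if_pos hgt]
        rw [List.map_cons, List.reverse_cons, List.foldl_append,
          ih (r - (l + 1)) (by omega) (l + 1) r rfl (by omega) hrn]
        simp only [List.foldl_cons, List.foldl_nil]
        rw [stepB_left nums limit _ _ _ _ _ _ _ (by omega)]
        simp only [pyGetD_nat]
        have hwin := win_cons nums l r (by omega) (by omega)
        obtain ⟨c, t, hct⟩ : ∃ c t, win nums (l + 1) r = c :: t := by
          have := win_length nums (l + 1) r (by omega) hrn
          cases hw : win nums (l + 1) r with
          | nil => rw [hw] at this; simp at this; omega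
          | cons c t => exact ⟨c, t, rfl⟩
        have hmx : (if mxW (win nums (l + 1) r) < nums.getD l 0 then nums.getD l 0
            else mxW (win nums (l + 1) r)) = mxW (win nums l r) := by
          rw [ite_lt_max, hwin, hct, mxW_cons, mxW_cons, List.foldl_cons, foldl_max_max]
          exact max_comm _ _
        have hmn : (if nums.getD l 0 < mnW (win nums (l + 1) r) then nums.getD l 0
            else mnW (win nums (l + 1) r)) = mnW (win nums l r) := by
          rw [ite_lt_min, hwin, hct, mnW_cons, mnW_cons, List.foldl_cons, foldl_min_min]
          exact min_comm _ _
        rw [hmx, hmn]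
        by_cases hsat : mxW (win nums l r) - mnW (win nums l r) ≤ limit
        · rw [if_pos hsat]; simp [firstSat, hsat]
        · rw [if_neg hsat]; simp [firstSat, hsat]
      · -- right endpoint dropped: the sweep grows the window on the right
        rw [if_neg hgt, if_neg hgt]
        rw [List.map_cons, List.reverse_cons, List.foldl_append,
          ih (r - 1 - l) (by omega) l (r - 1) rfl (by omega) (by omega)]
        simp only [List.foldl_cons, List.foldl_nil]
        rw [stepB_right nums limit _ _ _ _ _ _ _ (by omega) (by omega)]
        have hr1 : (r : Int) - 1 = ((r - 1 : Nat) : Int) := by omega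
        simp only [hr1, pyGetD_nat]
        have hwin := win_snoc nums l r (by omega) hrn
        obtain ⟨c, t, hct⟩ : ∃ c t, win nums l (r - 1) = c :: t := by
          have := win_length nums l (r - 1) (by omega) (by omega)
          cases hw : win nums l (r - 1) with
          | nil => rw [hw] at this; simp at this; omega
          | cons c t => exact ⟨c, t, rfl⟩
        have hmx : (if mxW (win nums l (r - 1)) < nums.getD (r - 1) 0 then nums.getD (r - 1) 0
            else mxW (win nums l (r - 1))) = mxW (win nums l r) := by
          rw [ite_lt_max, hwin, hct, mxW_cons, List.cons_append, mxW_cons, List.foldl_append]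
          rfl
        have hmn : (if nums.getD (r - 1) 0 < mnW (win nums l (r - 1)) then nums.getD (r - 1) 0
            else mnW (win nums l (r - 1))) = mnW (win nums l r) := by
          rw [ite_lt_min, hwin, hct, mnW_cons, List.cons_append, mnW_cons, List.foldl_append]
          rfl
        rw [hmx, hmn]
        by_cases hsat : mxW (win nums l r) - mnW (win nums l r) ≤ limit
        · rw [if_pos hsat]; simp [firstSat, hsat]
        · rw [if_neg hsat]; simp [firstSat, hsat]
    · -- singleton window: one sweep step over the one-element chain
      rw [dif_neg hone, dif_neg hone]
      have hre : r = l + 1 := by omega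
      have hwin : win nums l r = [nums.getD l 0] := by
        rw [win_cons nums l r (by omega) (by omega), hre]
        simp [win]
      simp only [List.map_cons, List.map_nil, List.reverse_cons, List.reverse_nil,
        List.nil_append, List.foldl_cons, List.foldl_nil]
      rw [stepB_stay nums limit _ _ _ _ _ _ _ (by omega) (by omega)]
      simp only [pyGetD_nat]
      have hmx : mxW (win nums l r) = nums.getD l 0 := by rw [hwin, mxW_cons]; rfl
      have hmn : mnW (win nums l r) = nums.getD l 0 := by rw [hwin, mnW_cons]; rfl
      rw [if_neg (lt_irrefl (nums.getD l 0))]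
      by_cases hsat : nums.getD l 0 - nums.getD l 0 ≤ limit
      · rw [if_pos hsat]; simp [firstSat, hmx, hmn]; omega
      · rw [if_neg hsat]; simp [firstSat, hmx, hmn]; omega

-- ===== VERDICT (by name: the statement is the Claim_ definition above) =====
theorem len_result_spec : Claim_equal_len_result := by
  intro nums limit _
  unfold Spec_len_result len_result len_result_alt
  by_cases hn : nums.length < 2
  · rw [if_pos hn, if_pos hn]
  · rw [if_neg hn, if_neg hn]
    have hlr : 0 < nums.length := by omega
    have hA : lenLoopA nums limit ((0 : Nat) : Int) ((nums.length : Nat) : Int) [] nums =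
        (chainN nums 0 nums.length).foldl (stepA nums limit) [] :=
      loopA_eq_fold nums limit nums.length 0 nums.length [] nums rfl hlr le_rfl (by omega)
    rw [show ((0 : Nat) : Int) = (0 : Int) from rfl] at hA
    rw [hA, fold_eq_firstSat nums limit nums.length 0 nums.length rfl hlr le_rfl]
    have hB := chainB_eq nums nums.length 0 nums.length [] rfl hlr
    rw [show ((0 : Nat) : Int) = (0 : Int) from rfl] at hB
    rw [hB]
    simp only [List.nil_append]
    simp only [pyGetD_nat]
    rw [sweepB_eq nums limit nums.length 0 nums.length rfl hlr le_rfl]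
    cases hfs : firstSat nums limit (chainN nums 0 nums.length) with
    | none => rfl
    | some p =>
      simp only [Option.map_some]
      rw [PySem.List.slice_natCast]
      rfl
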